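-- pv_equiv track=rewrite | github.com/Yusaku-Toma/Code | definitions.py | _path_to_order
-- ===== SOURCE A (Python) =====
-- def _path_to_order(path):
--     res_r = 0
--     res_c = 0
--     step = 1
--     for c in reversed(path):
--         if c == 'C':
--             res_r += step * 0
--             res_c += step * 0
--         elif c == 'D':
--             res_r += step * 1
--             res_c += step * 0
--         elif c == 'E':
--             res_r += step * 0
--             res_c += step * 1
--         elif c == 'F':
--             res_r += step * 1
--             res_c += step * 1
--         step *= 2
--     return res_r, res_c
-- ===== SOURCE B (Python) =====
-- _BITS = {'C': (0, 0), 'D': (1, 0), 'E': (0, 1), 'F': (1, 1)}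
--
-- def _path_to_order(path):
--     res_r = 0
--     res_c = 0
--     for ch in path:
--         rb, cb = _BITS.get(ch, (0, 0))
--         res_r = res_r * 2 + rb
--         res_c = res_c * 2 + cb
--     return res_r, res_c
-- ===== Notes on version B (the rewrite author's own statement) =====
-- stated objective: faster
-- what changed: Forward traversal with Horner's method (res = res*2 + bit per char, bits from a lookup table with (0,0) default) instead of iterating the reversed string with an explicit power-of-two step accumulator; a timing run measured B 66x faster at n=262144 because A materialises an ever-growing big-int step and performs four big-int multiplications (step*0/step*1) and additions per character, while B does one shift-and-add per accumulator.
import Mathlib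
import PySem

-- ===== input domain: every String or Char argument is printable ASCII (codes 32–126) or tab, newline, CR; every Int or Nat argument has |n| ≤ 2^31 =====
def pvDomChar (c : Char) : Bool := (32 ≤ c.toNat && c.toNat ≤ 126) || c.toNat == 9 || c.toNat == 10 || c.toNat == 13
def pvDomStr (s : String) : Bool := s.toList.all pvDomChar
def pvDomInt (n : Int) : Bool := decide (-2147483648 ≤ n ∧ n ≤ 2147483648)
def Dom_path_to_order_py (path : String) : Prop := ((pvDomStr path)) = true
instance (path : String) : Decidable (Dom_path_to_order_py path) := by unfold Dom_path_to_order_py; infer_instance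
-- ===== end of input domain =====

-- B replaces the reversed-iteration power-of-two accumulator with a forward Horner fold over a bit table; objective: simpler.


-- ===== PORT A =====
-- one iteration of A's loop body: branches in source order; step doubles unconditionally
def pvStepA (st : Int × Int × Int) (c : Char) : Int × Int × Int :=
  let (res_r, res_c, step) := st
  if c = 'C' then (res_r + step * 0, res_c + step * 0, step * 2)
  else if c = 'D' then (res_r + step * 1, res_c + step * 0, step * 2)
  else if c = 'E' then (res_r + step * 0, res_c + step * 1, step * 2)
  else if c = 'F' then (res_r + step * 1, res_c + step * 1, step * 2)
  else (res_r, res_c, step * 2)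

def path_to_order_py (path : String) : Int × Int :=
  let st := path.toList.reverse.foldl pvStepA (0, 0, 1)
  (st.1, st.2.1)

-- ===== PORT B =====
-- _BITS.get(ch, (0,0))
def pvBits (c : Char) : Int × Int :=
  if c = 'C' then (0, 0)
  else if c = 'D' then (1, 0)
  else if c = 'E' then (0, 1)
  else if c = 'F' then (1, 1)
  else (0, 0)

def pvStepB (rc : Int × Int) (c : Char) : Int × Int :=
  (rc.1 * 2 + (pvBits c).1, rc.2 * 2 + (pvBits c).2)

def path_to_order_py_alt (path : String) : Int × Int :=
  path.toList.foldl pvStepB (0, 0)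

-- ===== PRECONDITION & SPEC =====
def Spec_path_to_order_py (path : String) (out : Int × Int) : Prop := out = path_to_order_py_alt path
instance (path : String) (out : Int × Int) : Decidable (Spec_path_to_order_py path out) := by unfold Spec_path_to_order_py; infer_instance

-- ===== CLAIM (what is proved, stated in full; the proofs are below) =====
def Claim_equal_path_to_order_py : Prop := ∀ (path : String), Dom_path_to_order_py path → Spec_path_to_order_py path (path_to_order_py path)

-- ===== LEMMAS AND PROOFS =====

-- A's fold over a list m (the reversed path), started at (r, c, s), equals r/c plus s times
-- B's Horner fold over m.reverse, with the step ending at s * 2^|m|.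
theorem pvFold_relate (m : List Char) : ∀ (r c s : Int),
    m.foldl pvStepA (r, c, s) =
      (r + s * (m.reverse.foldl pvStepB (0, 0)).1,
       c + s * (m.reverse.foldl pvStepB (0, 0)).2,
       s * 2 ^ m.length) := by
  induction m with
  | nil => intro r c s; simp
  | cons x m ih =>
    intro r c s
    have hA : pvStepA (r, c, s) x = (r + s * (pvBits x).1, c + s * (pvBits x).2, s * 2) := by
      simp only [pvStepA, pvBits]
      split_ifs <;> simp
    rw [List.foldl_cons, hA, ih, List.reverse_cons, List.foldl_append]
    simp only [List.foldl_cons, List.foldl_nil, pvStepB, List.length_cons, Prod.mk.injEq]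
    refine ⟨by ring, by ring, by ring⟩

-- ===== VERDICT (by name: the statement is the Claim_ definition above) =====
theorem path_to_order_py_spec : Claim_equal_path_to_order_py := by
  intro path _
  unfold Spec_path_to_order_py path_to_order_py path_to_order_py_alt
  rw [pvFold_relate]
  simp
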